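-- pv_equiv track=rewrite | github.com/strainhzj/BtDeck | app/api/endpoints/downloader_settings.py | parse_days_of_week
-- ===== SOURCE A (Python) =====
-- def parse_days_of_week(days_of_week: str) -> list:
--     """将数据库 days_of_week 字符串转换为前端使用的数字列表（0-6，周一=0）。"""
--     if not days_of_week:
--         return []
--     result = []
--     for day_char in days_of_week:
--         if day_char.isdigit():
--             value = int(day_char)
--             if value == 7:
--                 value = 6
--             if 0 <= value <= 6:
--                 result.append(value)
--     return sorted(set(result))
-- ===== SOURCE B (Python) =====
-- def parse_days_of_week(days_of_week: str) -> list: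
--     """Scan the 7 days in order; a day is in the result iff its digit occurs in
--     the string (day 6 also matches '7'). Membership query per day instead of a
--     filtering pass over characters; dedup and order are automatic."""
--     result = []
--     for day in range(7):
--         if chr(48 + day) in days_of_week or (day == 6 and '7' in days_of_week):
--             result.append(day)
--     return result
-- ===== Notes on version B (the rewrite author's own statement) =====
-- stated objective: alternative
-- what changed: Inverts the traversal: instead of one pass over the characters collecting mapped digits and then set-deduplicating and sorting, B loops over the seven valid days in order and does a substring-membership test per day (day 6 also matching '7'), so the output is ordered and duplicate-free by construction.
import Mathlib
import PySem

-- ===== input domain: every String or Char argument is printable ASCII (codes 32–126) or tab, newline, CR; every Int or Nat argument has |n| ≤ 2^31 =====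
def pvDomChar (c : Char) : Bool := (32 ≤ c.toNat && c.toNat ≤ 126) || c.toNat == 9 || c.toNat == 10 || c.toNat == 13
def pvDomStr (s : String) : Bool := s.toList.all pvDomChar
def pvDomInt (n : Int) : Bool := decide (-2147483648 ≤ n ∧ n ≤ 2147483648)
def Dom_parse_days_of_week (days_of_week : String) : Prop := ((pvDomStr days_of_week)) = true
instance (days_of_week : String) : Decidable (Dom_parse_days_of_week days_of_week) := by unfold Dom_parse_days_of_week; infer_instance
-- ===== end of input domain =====

-- B inverts the traversal: a membership test per day over the 7 valid days, in order,
-- instead of a character-filtering pass followed by set-dedup and sort (objective: alternative).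

-- ===== PORT A =====
-- int(day_char) for a single char under the isdigit guard (ASCII domain) is its code minus 48 — exact there.
def parse_days_of_week (days_of_week : String) : List Int :=
  if days_of_week.toList = [] then []
  else
    let result : List Int := days_of_week.toList.foldl (fun acc day_char =>
      if PySem.Chars.isdigit day_char then
        let value : Int := (day_char.toNat : Int) - 48
        let value := if value = 7 then 6 else value
        if 0 ≤ value ∧ value ≤ 6 then acc ++ [value] else acc
      else acc) []
    PySem.List.sorted (PySem.Set.ofList result) (fun x => x) false

-- ===== PORT B =====
-- 'chr(48 + day) in days_of_week' for a single character is exactly char membership in the list of characters.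
def parse_days_of_week_alt (days_of_week : String) : List Int :=
  (PySem.List.pyRange 0 7 1).foldl (fun result day =>
    if days_of_week.toList.contains (Char.ofNat (48 + day).toNat)
        || (day == 6 && days_of_week.toList.contains '7')
    then result ++ [day] else result) []

-- ===== PRECONDITION & SPEC =====
def Spec_parse_days_of_week (days_of_week : String) (out : List Int) : Prop := out = parse_days_of_week_alt days_of_week
instance (days_of_week : String) (out : List Int) : Decidable (Spec_parse_days_of_week days_of_week out) := by unfold Spec_parse_days_of_week; infer_instance

-- ===== CLAIM (what is proved, stated in full; the proofs are below) =====
def Claim_equal_parse_days_of_week : Prop := ∀ (days_of_week : String), Dom_parse_days_of_week days_of_week → Spec_parse_days_of_week days_of_week (parse_days_of_week days_of_week)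

-- ===== LEMMAS AND PROOFS =====

-- A's loop body, named for the proofs
def pvStepA (acc : List Int) (c : Char) : List Int :=
  if PySem.Chars.isdigit c then
    let value : Int := (c.toNat : Int) - 48
    let value := if value = 7 then 6 else value
    if 0 ≤ value ∧ value ≤ 6 then acc ++ [value] else acc
  else acc

-- "character c contributes value x to A's accumulator"
def pvHit (c : Char) (x : Int) : Prop :=
  PySem.Chars.isdigit c = true ∧
    (if ((c.toNat : Int) - 48) = 7 then (6 : Int) else (c.toNat : Int) - 48) = x ∧
    0 ≤ x ∧ x ≤ 6

lemma pvDigit_iff (c : Char) : PySem.Chars.isdigit c = true ↔ 48 ≤ c.toNat ∧ c.toNat ≤ 57 := by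
  simp only [PySem.Chars.isdigit, Bool.and_eq_true, decide_eq_true_eq, Char.le_def,
    UInt32.le_iff_toNat_le]
  constructor <;> intro h <;> exact ⟨h.1, h.2⟩

lemma pvMem_stepA (a : List Int) (c : Char) (y : Int) :
    y ∈ pvStepA a c ↔ y ∈ a ∨ pvHit c y := by
  unfold pvStepA pvHit
  by_cases hd : PySem.Chars.isdigit c = true
  · rw [if_pos hd]
    set v : Int := if ((c.toNat : Int) - 48) = 7 then (6 : Int) else (c.toNat : Int) - 48 with hv
    by_cases h06 : 0 ≤ v ∧ v ≤ 6
    · rw [if_pos h06]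
      simp only [List.mem_append, List.mem_singleton]
      constructor
      · rintro (h | rfl)
        · exact Or.inl h
        · exact Or.inr ⟨hd, rfl, h06⟩
      · rintro (h | ⟨-, rfl, -⟩)
        · exact Or.inl h
        · exact Or.inr rfl
    · rw [if_neg h06]
      constructor
      · exact Or.inl
      · rintro (h | ⟨-, rfl, h1, h2⟩)
        · exact h
        · exact absurd ⟨h1, h2⟩ h06
  · rw [if_neg hd]
    constructor
    · exact Or.inl
    · rintro (h | ⟨hc, -⟩)
      · exact h
      · exact absurd hc hd

lemma pvMem_foldlA (cs : List Char) (a : List Int) (y : Int) :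
    y ∈ cs.foldl pvStepA a ↔ y ∈ a ∨ ∃ c ∈ cs, pvHit c y := by
  induction cs generalizing a with
  | nil => simp
  | cons c cs ih =>
    simp only [List.foldl_cons, ih, pvMem_stepA, List.mem_cons]
    constructor
    · rintro ((h | h) | ⟨d, hd, hh⟩)
      · exact Or.inl h
      · exact Or.inr ⟨c, Or.inl rfl, h⟩
      · exact Or.inr ⟨d, Or.inr hd, hh⟩
    · rintro (h | ⟨d, (rfl | hd), hh⟩)
      · exact Or.inl (Or.inl h)
      · exact Or.inl (Or.inr hh)
      · exact Or.inr ⟨d, hd, hh⟩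

-- Char equality via codepoints
lemma pvChar_eq_iff_toNat (c d : Char) : c = d ↔ c.toNat = d.toNat := by
  constructor
  · rintro rfl; rfl
  · intro h
    have h2 : c.val.toNat = d.val.toNat := h
    exact Char.ext (UInt32.toNat_inj.mp h2)

-- which characters hit a given day value
lemma pvHit_iff_lt6 (c : Char) (x : Int) (hx : 0 ≤ x ∧ x < 6) :
    pvHit c x ↔ (c.toNat : Int) = 48 + x := by
  unfold pvHit
  rw [pvDigit_iff]
  by_cases h7 : ((c.toNat : Int) - 48) = 7
  · rw [if_pos h7]; omega
  · rw [if_neg h7]; omega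

lemma pvHit_iff_6 (c : Char) :
    pvHit c 6 ↔ c.toNat = 54 ∨ c.toNat = 55 := by
  unfold pvHit
  rw [pvDigit_iff]
  by_cases h7 : ((c.toNat : Int) - 48) = 7
  · rw [if_pos h7]; omega
  · rw [if_neg h7]; omega

-- membership of a literal char in a char list, via codepoints
lemma pvContains_iff (cs : List Char) (d : Char) :
    cs.contains d = true ↔ ∃ c ∈ cs, c.toNat = d.toNat := by
  simp only [List.contains_iff_mem]
  constructor
  · intro h; exact ⟨d, h, rfl⟩
  · rintro ⟨c, hc, he⟩
    have : c = d := (pvChar_eq_iff_toNat c d).mpr he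
    subst this; exact hc

-- A's accumulator only ever holds values in 0..6
lemma pvAcc_range (cs : List Char) (x : Int) (hx : x ∈ cs.foldl pvStepA []) :
    0 ≤ x ∧ x ≤ 6 := by
  rcases (pvMem_foldlA cs [] x).mp hx with h | ⟨c, -, -, -, h⟩
  · simp at h
  · exact h

-- A's sorted(set(result)) is the ordered scan of 0..6 filtered by membership
lemma pvSorted_eq_filter (acc : List Int) (h : ∀ x ∈ acc, 0 ≤ x ∧ x ≤ 6) :
    PySem.List.sorted (PySem.Set.ofList acc) (fun x => x) false
      = ([0, 1, 2, 3, 4, 5, 6] : List Int).filter (fun i => decide (i ∈ acc)) := by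
  apply PySem.List.sorted_eq_of_perm_of_pairwise_lt
  · refine ((List.perm_ext_iff_of_nodup (List.Nodup.filter _ (by decide))
      (PySem.Set.nodup_ofList acc)).mpr ?_)
    intro x
    simp only [PySem.Set.mem_ofList, List.mem_filter, decide_eq_true_eq]
    constructor
    · exact fun hx => hx.2
    · intro hx
      refine ⟨?_, hx⟩
      have hr := h x hx
      have h0 : x = 0 ∨ x = 1 ∨ x = 2 ∨ x = 3 ∨ x = 4 ∨ x = 5 ∨ x = 6 := by omega
      rcases h0 with h'|h'|h'|h'|h'|h'|h' <;> simp [h']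
  · exact List.Pairwise.filter _ (by decide)

-- B's loop equals the filter of 0..6 by B's per-day test
lemma pvB_eq_filter (cs : List Char) :
    (PySem.List.pyRange 0 7 1).foldl (fun result day =>
        if cs.contains (Char.ofNat (48 + day).toNat)
            || (day == 6 && cs.contains '7')
        then result ++ [day] else result) []
      = ([0, 1, 2, 3, 4, 5, 6] : List Int).filter (fun day =>
          cs.contains (Char.ofNat (48 + day).toNat) || (day == 6 && cs.contains '7')) := by
  have hrange : PySem.List.pyRange 0 7 1 = ([0, 1, 2, 3, 4, 5, 6] : List Int) := by decide
  rw [hrange]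
  exact PySem.List.foldl_append_if_eq_filter _ _ _

-- B's per-day test for a day 0..5 is exactly membership in A's accumulator
lemma pvDay_small (cs : List Char) (x : Int) (d : Char) (hx : 0 ≤ x ∧ x < 6)
    (hd : (d.toNat : Int) = 48 + x) :
    decide (x ∈ cs.foldl pvStepA []) = cs.contains d := by
  rw [Bool.eq_iff_iff, decide_eq_true_iff, pvMem_foldlA, pvContains_iff]
  simp only [List.not_mem_nil, false_or]
  constructor
  · rintro ⟨c, hc, hh⟩
    exact ⟨c, hc, by have := (pvHit_iff_lt6 c x hx).mp hh; omega⟩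
  · rintro ⟨c, hc, he⟩
    exact ⟨c, hc, (pvHit_iff_lt6 c x hx).mpr (by omega)⟩

-- and day 6 is hit exactly by a '6' or a '7' in the string
lemma pvDay_six (cs : List Char) :
    decide ((6 : Int) ∈ cs.foldl pvStepA []) = (cs.contains '6' || cs.contains '7') := by
  rw [Bool.eq_iff_iff, decide_eq_true_iff, pvMem_foldlA]
  simp only [List.not_mem_nil, false_or, Bool.or_eq_true, pvContains_iff]
  constructor
  · rintro ⟨c, hc, hh⟩
    rcases (pvHit_iff_6 c).mp hh with h | h
    · exact Or.inl ⟨c, hc, by simpa using h⟩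
    · exact Or.inr ⟨c, hc, by simpa using h⟩
  · rintro (⟨c, hc, he⟩ | ⟨c, hc, he⟩)
    · exact ⟨c, hc, (pvHit_iff_6 c).mpr (Or.inl (by simpa using he))⟩
    · exact ⟨c, hc, (pvHit_iff_6 c).mpr (Or.inr (by simpa using he))⟩

-- the per-day tests agree on each of the seven days
lemma pvTests_agree (cs : List Char) (i : Int) (hi : i ∈ ([0, 1, 2, 3, 4, 5, 6] : List Int)) :
    decide (i ∈ cs.foldl pvStepA []) =
      (cs.contains (Char.ofNat (48 + i).toNat) || (i == 6 && cs.contains '7')) := by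
  fin_cases hi
  · rw [show Char.ofNat ((48 + (0:Int)).toNat) = '0' from rfl,
      show ((0:Int) == 6) = false from rfl, pvDay_small cs 0 '0' (by norm_num) (by decide)]
    simp
  · rw [show Char.ofNat ((48 + (1:Int)).toNat) = '1' from rfl,
      show ((1:Int) == 6) = false from rfl, pvDay_small cs 1 '1' (by norm_num) (by decide)]
    simp
  · rw [show Char.ofNat ((48 + (2:Int)).toNat) = '2' from rfl,
      show ((2:Int) == 6) = false from rfl, pvDay_small cs 2 '2' (by norm_num) (by decide)]
    simp
  · rw [show Char.ofNat ((48 + (3:Int)).toNat) = '3' from rfl,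
      show ((3:Int) == 6) = false from rfl, pvDay_small cs 3 '3' (by norm_num) (by decide)]
    simp
  · rw [show Char.ofNat ((48 + (4:Int)).toNat) = '4' from rfl,
      show ((4:Int) == 6) = false from rfl, pvDay_small cs 4 '4' (by norm_num) (by decide)]
    simp
  · rw [show Char.ofNat ((48 + (5:Int)).toNat) = '5' from rfl,
      show ((5:Int) == 6) = false from rfl, pvDay_small cs 5 '5' (by norm_num) (by decide)]
    simp
  · rw [show Char.ofNat ((48 + (6:Int)).toNat) = '6' from rfl,
      show ((6:Int) == 6) = true from rfl, pvDay_six cs]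
    simp

-- ===== VERDICT (by name: the statement is the Claim_ definition above) =====
theorem parse_days_of_week_spec : Claim_equal_parse_days_of_week := by
  unfold Claim_equal_parse_days_of_week
  intro s _
  unfold Spec_parse_days_of_week parse_days_of_week parse_days_of_week_alt
  have hA : (fun acc day_char =>
      if PySem.Chars.isdigit day_char then
        let value : Int := (day_char.toNat : Int) - 48
        let value := if value = 7 then 6 else value
        if 0 ≤ value ∧ value ≤ 6 then acc ++ [value] else acc
      else acc) = pvStepA := rfl
  rw [pvB_eq_filter]
  by_cases he : s.toList = []
  · rw [if_pos he, he]
    decide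
  · rw [if_neg he]
    simp only [hA]
    rw [pvSorted_eq_filter _ (fun x hx => pvAcc_range s.toList x hx)]
    exact List.filter_congr (fun i hi => pvTests_agree s.toList i hi)
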